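-- pv_equiv track=rewrite | github.com/Blanquitta/Python_homework | assignment1/assignment1.py | titleize
-- ===== SOURCE A (Python) =====
-- def titleize(input_string):
--     # Define the list of exception words that should not be capitalized
--     exceptions = {"a", "on", "an", "the", "of", "and", "is", "in"}
--
--     # Split the input string into a list of words
--     words = input_string.split()
--
--     # Loop through the words with their index using enumerate
--     for index, word in enumerate(words):
--         if index == 0 or index == len(words) - 1:  # Always capitalize the first and last words
--             words[index] = word.capitalize()
--         elif word in exceptions:  # Lowercase the exceptions in the middle
--             words[index] = word.lower()
--         else:  # Capitalize all other words
--             words[index] = word.capitalize()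
--
--     # Join the words back into a single string
--     return " ".join(words)
-- ===== SOURCE B (Python) =====
-- def titleize(input_string):
--     exceptions = {"a", "on", "an", "the", "of", "and", "is", "in"}
--
--     def go(ws):
--         # ws is a non-empty suffix of the word list; its last element is the
--         # final word of the sentence, reached as the singleton base case.
--         if len(ws) == 1:
--             return [ws[0].capitalize()]
--         head = ws[0]
--         fixed = head.lower() if head in exceptions else head.capitalize()
--         return [fixed] + go(ws[1:])
--
--     words = input_string.split()
--     if not words:
--         return ""
--     rest = go(words[1:]) if len(words) > 1 else []
--     return " ".join([words[0].capitalize()] + rest)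
-- ===== Notes on version B (the rewrite author's own statement) =====
-- stated objective: alternative
-- what changed: Replaces A's indexed in-place enumerate loop (with index==0 / index==len-1 tests) by index-free structural recursion on the word list: the head is capitalized up front and the last word is reached as the singleton base case, interior words decided by membership.
import Mathlib
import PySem

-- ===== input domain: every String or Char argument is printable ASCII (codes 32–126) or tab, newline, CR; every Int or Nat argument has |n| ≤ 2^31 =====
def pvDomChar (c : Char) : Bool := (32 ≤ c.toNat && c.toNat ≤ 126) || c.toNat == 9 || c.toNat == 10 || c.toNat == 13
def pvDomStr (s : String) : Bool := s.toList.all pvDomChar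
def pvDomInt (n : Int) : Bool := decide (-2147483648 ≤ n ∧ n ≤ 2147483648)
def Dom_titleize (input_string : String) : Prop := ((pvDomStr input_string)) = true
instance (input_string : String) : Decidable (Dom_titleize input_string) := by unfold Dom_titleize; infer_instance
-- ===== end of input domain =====

-- B replaces A's indexed enumerate loop by index-free structural recursion on the word list
-- (head up front, last word as the singleton base case); return values proved equal on all inputs.

-- shared helper: Python str.capitalize() (exact on ASCII: upper first char, lower the rest)
def pvCap (s : String) : String :=
  match s.toList with
  | [] => ""
  | c :: cs => String.ofList (PySem.Chars.upperChar c :: PySem.Chars.lower cs)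

def pvExceptions : List String := ["a", "on", "an", "the", "of", "and", "is", "in"]

-- ===== PORT A =====
-- the enumerate loop writes only at the current index, so it is this index-recursive rewrite
def titleizeGo (n : Nat) (i : Nat) (ws : List String) : List String :=
  match ws with
  | [] => []
  | w :: rest =>
      (if i == 0 || i == n - 1 then pvCap w
       else if w ∈ pvExceptions then PySem.Str.lower w
       else pvCap w) :: titleizeGo n (i + 1) rest

def titleize (input_string : String) : String :=
  let words := PySem.Str.split₀ input_string
  PySem.Str.join " " (titleizeGo words.length 0 words)

-- ===== PORT B =====
-- Source B's helper go(ws): singleton base case = the last word, interior by membership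
def altGo (ws : List String) : List String :=
  match ws with
  | [] => []          -- unreachable in Source B (go is only called on non-empty suffixes)
  | [w] => [pvCap w]
  | w :: rest => (if w ∈ pvExceptions then PySem.Str.lower w else pvCap w) :: altGo rest

def titleize_alt (input_string : String) : String :=
  match PySem.Str.split₀ input_string with
  | [] => ""
  | w :: rest => PySem.Str.join " " (pvCap w :: altGo rest)

-- ===== PRECONDITION & SPEC =====
def Spec_titleize (input_string : String) (out : String) : Prop := out = titleize_alt input_string
instance (input_string : String) (out : String) : Decidable (Spec_titleize input_string out) := by unfold Spec_titleize; infer_instance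

-- ===== CLAIM (what is proved, stated in full; the proofs are below) =====
def Claim_equal_titleize : Prop := ∀ (input_string : String), Dom_titleize input_string → Spec_titleize input_string (titleize input_string)

-- ===== LEMMAS AND PROOFS =====

-- on the tail of the word list (i ≥ 1, i + |ws| = n) A's indexed loop computes B's recursion
lemma titleizeGo_eq_altGo (n : Nat) :
    ∀ (ws : List String) (i : Nat), 1 ≤ i → i + ws.length = n →
      titleizeGo n i ws = altGo ws := by
  intro ws
  induction ws with
  | nil => intro i _ _; rfl
  | cons w rest ih =>
      intro i hi hlen
      cases rest with
      | nil =>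
          have h1 : (i == 0 || i == n - 1) = true := by
            simp only [List.length_cons, List.length_nil] at hlen
            simp; omega
          simp [titleizeGo, altGo, h1]
      | cons w2 rest2 =>
          have h1 : (i == 0 || i == n - 1) = false := by
            simp only [List.length_cons] at hlen
            simp; omega
          have hlen2 : i + 1 + (w2 :: rest2).length = n := by
            simp only [List.length_cons] at hlen ⊢; omega
          have hA : titleizeGo n i (w :: w2 :: rest2) =
              (if i == 0 || i == n - 1 then pvCap w
               else if w ∈ pvExceptions then PySem.Str.lower w
               else pvCap w) :: titleizeGo n (i + 1) (w2 :: rest2) := rfl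
          rw [hA, ih (i + 1) (by omega) hlen2]
          simp only [h1, Bool.false_eq_true, if_false, altGo]

-- ===== VERDICT (by name: the statement is the Claim_ definition above) =====
theorem titleize_spec : Claim_equal_titleize := by
  intro input_string _
  unfold Spec_titleize
  simp only [titleize, titleize_alt]
  cases hws : PySem.Str.split₀ input_string with
  | nil => rfl
  | cons w rest =>
      have h0 : ((0 : Nat) == 0 || 0 == (w :: rest).length - 1) = true := by simp
      simp only [titleizeGo, h0, if_true]
      cases rest with
      | nil => rfl
      | cons w2 rest2 =>
          rw [titleizeGo_eq_altGo ((w :: w2 :: rest2).length) (w2 :: rest2) 1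
              (le_refl 1) (by simp; omega)]
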